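-- pv_equiv track=rewrite | github.com/opencybersecurityalliance/stix-shifter | stix_shifter_modules/aws_guardduty/stix_translation/query_constructor.py | _and_operator_query
-- ===== SOURCE A (Python) =====
-- import copy
--
-- class SimilarExpressionForAndOperatorException(Exception):
--     pass
--
-- def _and_operator_query(previous_all_queries, current_all_queries, expression):
--     """
--     Merge previous query with current query, and log the error in case of similar fields
--     :param expression
--     :param previous_all_queries:list
--     :param current_all_queries:list
--     :return: list
--     """
--     merged_query = []
--
--     for previous_queries in previous_all_queries:
--         for current_queries in current_all_queries:
--             current_query = copy.deepcopy(current_queries)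
--             previous_query = copy.deepcopy(previous_queries)
--             if not current_query.keys() - previous_query.keys():
--                 comparison = str(expression).split(" ")
--                 raise SimilarExpressionForAndOperatorException(f'The expression [{comparison[0][21:]}] has same '
--                                                                f'data source field mapping with another expression '
--                                                                f'in the pattern which has only AND comparison '
--                                                                f'operator. Recommended to Use OR operator. ')
--             # merge multiple queries into a single query
--             previous_query.update(current_query)
--             if previous_query not in merged_query:
--                 merged_query.append(previous_query)
--     return merged_query
-- ===== SOURCE B (Python) =====
-- class SimilarExpressionForAndOperatorException(Exception):
--     pass
--
-- def _and_operator_query(previous_all_queries, current_all_queries, expression):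
--     """
--     Merge previous query with current query, and log the error in case of similar fields.
--     Builds the cross product by recursion on previous_all_queries (validating and merging
--     each row as it goes), then removes duplicates by a recursive filter that drops every
--     later duplicate of the current head.
--     """
--     return _dedup(_cross(previous_all_queries, current_all_queries, expression))
--
-- def _cross(previous_all_queries, current_all_queries, expression):
--     if not previous_all_queries:
--         return []
--     head = previous_all_queries[0]
--     row = []
--     for current in current_all_queries:
--         if not current.keys() - head.keys():
--             comparison = str(expression).split(" ")
--             raise SimilarExpressionForAndOperatorException(f'The expression [{comparison[0][21:]}] has same '
--                                                            f'data source field mapping with another expression '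
--                                                            f'in the pattern which has only AND comparison '
--                                                            f'operator. Recommended to Use OR operator. ')
--         row.append({**head, **current})
--     return row + _cross(previous_all_queries[1:], current_all_queries, expression)
--
-- def _dedup(queries):
--     if not queries:
--         return []
--     head = queries[0]
--     return [head] + _dedup([q for q in queries[1:] if q != head])
-- ===== Notes on version B (the rewrite author's own statement) =====
-- stated objective: alternative
-- what changed: B builds the cross product by recursion on previous_all_queries (no deepcopy, dict unpacking for the merge) and deduplicates by a recursive filter that drops all later duplicates of each head, instead of A's single interleaved nested loop with an append-if-absent accumulator and a linear membership scan.
import Mathlib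
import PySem

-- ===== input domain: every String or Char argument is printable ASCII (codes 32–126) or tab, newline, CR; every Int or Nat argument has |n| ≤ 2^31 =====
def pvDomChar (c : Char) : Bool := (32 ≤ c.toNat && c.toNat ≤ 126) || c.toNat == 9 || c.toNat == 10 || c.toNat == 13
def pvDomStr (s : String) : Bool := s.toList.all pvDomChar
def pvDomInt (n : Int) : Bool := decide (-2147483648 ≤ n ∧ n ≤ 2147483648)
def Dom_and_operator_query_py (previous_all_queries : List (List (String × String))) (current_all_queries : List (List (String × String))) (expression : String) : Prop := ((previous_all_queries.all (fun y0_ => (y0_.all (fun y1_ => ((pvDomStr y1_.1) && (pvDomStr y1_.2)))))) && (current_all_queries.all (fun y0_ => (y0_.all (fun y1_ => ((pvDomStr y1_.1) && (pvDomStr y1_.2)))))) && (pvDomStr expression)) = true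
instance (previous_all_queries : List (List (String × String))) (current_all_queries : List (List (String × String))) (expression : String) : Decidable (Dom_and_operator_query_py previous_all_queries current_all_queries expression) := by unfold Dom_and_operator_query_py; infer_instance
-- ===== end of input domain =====

-- B builds the cross product by recursion on previous_all_queries and deduplicates by a
-- recursive filter dropping later duplicates, instead of A's interleaved nested loop with an
-- append-if-absent accumulator; the proved equivalence is about the RETURN value
-- (neither version mutates its arguments). Inner dicts are modelled as association lists
-- built into PySem.Dict (Python dict semantics).

-- ===== PORT A =====
-- Python's `d1 == d2` on dicts: same number of entries and every key of d1 maps to the same value in d2.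
def pyDictEq (d e : PySem.Dict String String) : Bool :=
  d.size == e.size && d.items.all (fun p => e.get? p.1 == some p.2)

-- body of A's doubly-nested loop for one (previous_queries, current_queries) pair;
-- `none` is the `raise SimilarExpressionForAndOperatorException` (excluded by Pre_).
def aPairStep (merged_query : List (PySem.Dict String String)) (previous_queries current_queries : List (String × String)) : Option (List (PySem.Dict String String)) :=
  let current_query := PySem.Dict.ofList current_queries
  let previous_query := PySem.Dict.ofList previous_queries
  if PySem.Set.diff current_query.keys previous_query.keys = ([] : List String) then
    none
  else
    let previous_query := previous_query.update current_query.items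
    if merged_query.any (fun r => pyDictEq r previous_query) then some merged_query
    else some (merged_query ++ [previous_query])

def and_operator_query_py (previous_all_queries : List (List (String × String))) (current_all_queries : List (List (String × String))) (expression : String) : List (List (String × String)) :=
  ((previous_all_queries.foldl
      (fun acc previous_queries =>
        current_all_queries.foldl
          (fun acc2 current_queries => acc2.bind (fun m => aPairStep m previous_queries current_queries))
          acc)
      (some [])).getD []).map (fun d => d.items)

-- ===== PORT B =====
-- {**head, **current}
def bMerge (head current : List (String × String)) : PySem.Dict String String :=
  (PySem.Dict.ofList head).update (PySem.Dict.ofList current).items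

-- B's `_cross`: recursion on previous_all_queries; the row loop is a fold over
-- current_all_queries; `none` is the raise (excluded by Pre_).
def bCross (previous_all_queries current_all_queries : List (List (String × String))) : Option (List (PySem.Dict String String)) :=
  match previous_all_queries with
  | [] => some []
  | head :: rest =>
    (current_all_queries.foldl
      (fun acc current => acc.bind (fun row =>
        if PySem.Set.diff (PySem.Dict.ofList current).keys (PySem.Dict.ofList head).keys = ([] : List String) then
          none
        else
          some (row ++ [bMerge head current])))
      (some [])).bind
    (fun row => (bCross rest current_all_queries).map (fun tail => row ++ tail))

-- B's `_dedup`: head, then recurse on the tail with the head's duplicates filtered out.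
def bDedup (queries : List (PySem.Dict String String)) : List (PySem.Dict String String) :=
  match queries with
  | [] => []
  | head :: rest => head :: bDedup (rest.filter (fun q => !pyDictEq q head))
termination_by queries.length
decreasing_by simpa using (List.length_filter_le _ _).trans (by simp)

def and_operator_query_py_alt (previous_all_queries : List (List (String × String))) (current_all_queries : List (List (String × String))) (expression : String) : List (List (String × String)) :=
  match bCross previous_all_queries current_all_queries with
  | none => []  -- the raise; Pre_ excludes these inputs
  | some candidates => (bDedup candidates).map (fun d => d.items)

-- ===== PRECONDITION & SPEC =====
-- Pre_ excludes exactly the inputs on which A raises SimilarExpressionForAndOperatorException: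
-- some cross pair where the current query's key set is contained in the previous query's key set.
def Pre_and_operator_query_py (previous_all_queries : List (List (String × String))) (current_all_queries : List (List (String × String))) (expression : String) : Prop :=
  ∀ p ∈ previous_all_queries, ∀ c ∈ current_all_queries, ∃ kv ∈ c, kv.1 ∉ p.map Prod.fst
instance (previous_all_queries : List (List (String × String))) (current_all_queries : List (List (String × String))) (expression : String) : Decidable (Pre_and_operator_query_py previous_all_queries current_all_queries expression) := by unfold Pre_and_operator_query_py; infer_instance

def pvWitness_and_operator_query_py : (List (List (String × String))) × (List (List (String × String))) × String :=
  ([[("a", "1")]], [[("b", "2")]], "x")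

def Spec_and_operator_query_py (previous_all_queries : List (List (String × String))) (current_all_queries : List (List (String × String))) (expression : String) (out : List (List (String × String))) : Prop := out = and_operator_query_py_alt previous_all_queries current_all_queries expression
instance (previous_all_queries : List (List (String × String))) (current_all_queries : List (List (String × String))) (expression : String) (out : List (List (String × String))) : Decidable (Spec_and_operator_query_py previous_all_queries current_all_queries expression out) := by unfold Spec_and_operator_query_py; infer_instance

-- ===== CLAIM (what is proved, stated in full; the proofs are below) =====
def Claim_equal_and_operator_query_py : Prop := ∀ (previous_all_queries : List (List (String × String))) (current_all_queries : List (List (String × String))) (expression : String), Dom_and_operator_query_py previous_all_queries current_all_queries expression → Pre_and_operator_query_py previous_all_queries current_all_queries expression → Spec_and_operator_query_py previous_all_queries current_all_queries expression (and_operator_query_py previous_all_queries current_all_queries expression)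

-- ===== LEMMAS AND PROOFS =====

-- canonical key of a dict (sorted item list); two nodup-key dicts are Python-equal iff equal canon
def canonKey (d : PySem.Dict String String) : List (String × String) :=
  PySem.List.sorted d.items (fun kv => kv.1)

-- A's dedup-append step, raise removed
def dedupA (m : List (PySem.Dict String String)) (q : PySem.Dict String String) : List (PySem.Dict String String) :=
  if m.any (fun r => pyDictEq r q) then m else m ++ [q]

-- canon-based versions of both dedups (used only inside the proof)
def foldCanon (out : List (PySem.Dict String String)) (qs : List (PySem.Dict String String)) : List (PySem.Dict String String) :=
  qs.foldl (fun m q => if m.any (fun r => decide (canonKey r = canonKey q)) then m else m ++ [q]) out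

def recCanon (qs : List (PySem.Dict String String)) : List (PySem.Dict String String) :=
  match qs with
  | [] => []
  | q :: rest => q :: recCanon (rest.filter (fun r => !decide (canonKey r = canonKey q)))
termination_by qs.length
decreasing_by simpa using (List.length_filter_le _ _).trans (by simp)

lemma mem_keys_ofList (ps : List (String × String)) (k : String) :
    k ∈ (PySem.Dict.ofList ps).keys ↔ k ∈ ps.map Prod.fst := by
  show k ∈ (List.foldl (fun acc p => acc.insert p.1 p.2) PySem.Dict.empty ps).keys ↔ _
  rw [PySem.Dict.keys_foldl_insert_key ps Prod.fst (fun d p => p.2)]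
  simp [PySem.Dict.keys_empty, PySem.Set.update_nil_left, PySem.Set.mem_ofList]

lemma raiseCond_false (p c : List (String × String))
    (h : ∃ kv ∈ c, kv.1 ∉ p.map Prod.fst) :
    ¬ (PySem.Set.diff (PySem.Dict.ofList c).keys (PySem.Dict.ofList p).keys = ([] : List String)) := by
  obtain ⟨kv, hkc, hkp⟩ := h
  intro hnil
  have : kv.1 ∈ PySem.Set.diff (PySem.Dict.ofList c).keys (PySem.Dict.ofList p).keys := by
    rw [PySem.Set.mem_diff]
    exact ⟨(mem_keys_ofList c kv.1).mpr (List.mem_map_of_mem hkc),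
           fun hk => hkp ((mem_keys_ofList p kv.1).mp hk)⟩
  simp [hnil] at this

lemma nodup_keys_bMerge (p c : List (String × String)) : (bMerge p c).keys.Nodup :=
  PySem.Dict.nodup_keys_update _ _ (PySem.Dict.nodup_keys_ofList p)

lemma pyDictEq_eq_canon (d e : PySem.Dict String String)
    (hd : d.keys.Nodup) (he : e.keys.Nodup) :
    pyDictEq d e = decide (canonKey d = canonKey e) := by
  have key : pyDictEq d e = true ↔ canonKey d = canonKey e := by
    constructor
    · intro h
      simp only [pyDictEq, Bool.and_eq_true, beq_iff_eq, List.all_eq_true] at h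
      obtain ⟨hlen, hmem⟩ := h
      have hsub : d.items ⊆ e.items := by
        intro p hp
        have := hmem p hp
        exact PySem.Dict.mem_items_of_get?_eq_some e this
      have hdi : d.items.Nodup := hd.of_map
      have hperm : d.items.Perm e.items :=
        (hdi.subperm hsub).perm_of_length_le (le_of_eq hlen.symm)
      have hpe : (canonKey e).Perm d.items :=
        ((PySem.List.sorted_perm e.items (fun kv => kv.1) false).trans hperm.symm)
      have hlt : (canonKey e).Pairwise (fun a b => a.1 < b.1) := by
        have h1 := PySem.List.sorted_pairwise e.items (fun kv => kv.1)
        have hmapnd : ((canonKey e).map Prod.fst).Nodup := by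
          have : (canonKey e).Perm e.items := PySem.List.sorted_perm e.items (fun kv => kv.1) false
          exact ((this.map Prod.fst).nodup_iff).mpr he
        have h2 : (canonKey e).Pairwise (fun a b => a.1 ≠ b.1) := List.pairwise_map.mp hmapnd
        exact (h1.and h2).imp (fun ⟨hle, hne⟩ => lt_of_le_of_ne hle hne)
      exact PySem.List.sorted_eq_of_perm_of_pairwise_lt d.items (canonKey e) (fun kv => kv.1) hpe hlt
    · intro h
      have hperm : d.items.Perm e.items :=
        (PySem.List.sorted_perm d.items (fun kv => kv.1) false).symm.trans
          (by rw [show PySem.List.sorted d.items (fun kv => kv.1) false = canonKey d from rfl, h]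
              exact PySem.List.sorted_perm e.items (fun kv => kv.1) false)
      simp only [pyDictEq, Bool.and_eq_true, beq_iff_eq, List.all_eq_true]
      refine ⟨hperm.length_eq, fun p hp => ?_⟩
      have : (p.1, p.2) ∈ e.items := hperm.subset hp
      exact PySem.Dict.get?_of_mem_items e this he
  rw [Bool.eq_iff_iff]
  simp only [decide_eq_true_eq]
  exact key

-- A's inner option fold never raises and equals the pure dedup fold
lemma aInner_eq (p : List (String × String)) (cur : List (List (String × String)))
    (h : ∀ c ∈ cur, ∃ kv ∈ c, kv.1 ∉ p.map Prod.fst) (m : List (PySem.Dict String String)) :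
    cur.foldl (fun acc2 c => acc2.bind (fun m => aPairStep m p c)) (some m)
      = some (cur.foldl (fun m c => dedupA m (bMerge p c)) m) := by
  induction cur generalizing m with
  | nil => rfl
  | cons c cs ih =>
    have hstep : aPairStep m p c = some (dedupA m (bMerge p c)) := by
      unfold aPairStep dedupA bMerge
      rw [if_neg (raiseCond_false p c (h c (by simp)))]
      dsimp only
      split_ifs <;> rfl
    simp only [List.foldl_cons, Option.bind_some, hstep]
    exact ih (fun c hc => h c (by simp [hc])) _

lemma aOuter_eq (prev cur : List (List (String × String)))
    (h : ∀ p ∈ prev, ∀ c ∈ cur, ∃ kv ∈ c, kv.1 ∉ p.map Prod.fst) (m : List (PySem.Dict String String)) :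
    prev.foldl (fun acc p => cur.foldl (fun acc2 c => acc2.bind (fun m => aPairStep m p c)) acc) (some m)
      = some (prev.foldl (fun m p => cur.foldl (fun m c => dedupA m (bMerge p c)) m) m) := by
  induction prev generalizing m with
  | nil => rfl
  | cons p ps ih =>
    simp only [List.foldl_cons, aInner_eq p cur (h p (by simp)) m]
    exact ih (fun p hp => h p (by simp [hp])) _

-- B's row fold never raises and produces the mapped row
lemma bRow_eq (head : List (String × String)) (cur : List (List (String × String)))
    (h : ∀ c ∈ cur, ∃ kv ∈ c, kv.1 ∉ head.map Prod.fst) (row : List (PySem.Dict String String)) :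
    cur.foldl
      (fun acc current => acc.bind (fun row =>
        if PySem.Set.diff (PySem.Dict.ofList current).keys (PySem.Dict.ofList head).keys = ([] : List String) then
          none
        else
          some (row ++ [bMerge head current])))
      (some row)
      = some (row ++ cur.map (bMerge head)) := by
  induction cur generalizing row with
  | nil => simp
  | cons c cs ih =>
    simp only [List.foldl_cons, Option.bind_some]
    rw [if_neg (raiseCond_false head c (h c (by simp)))]
    rw [ih (fun c hc => h c (by simp [hc])) _]
    simp

lemma bCross_eq (prev cur : List (List (String × String)))
    (h : ∀ p ∈ prev, ∀ c ∈ cur, ∃ kv ∈ c, kv.1 ∉ p.map Prod.fst) :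
    bCross prev cur = some (prev.flatMap (fun p => cur.map (bMerge p))) := by
  induction prev with
  | nil => rfl
  | cons p ps ih =>
    unfold bCross
    rw [bRow_eq p cur (h p (by simp)) [], ih (fun p hp => h p (by simp [hp]))]
    simp

-- foldCanon with accumulator = accumulator ++ recCanon of the not-yet-represented tail
lemma foldCanon_eq_recCanon (qs : List (PySem.Dict String String)) (out : List (PySem.Dict String String)) :
    foldCanon out qs = out ++ recCanon (qs.filter (fun b => !out.any (fun r => decide (canonKey r = canonKey b)))) := by
  induction qs generalizing out with
  | nil =>
    simp only [List.filter_nil]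
    rw [show recCanon [] = [] from by rw [recCanon]]
    simp [foldCanon]
  | cons q rest ih =>
    by_cases hc : out.any (fun r => decide (canonKey r = canonKey q)) = true
    · have : foldCanon out (q :: rest) = foldCanon out rest := by
        simp only [foldCanon, List.foldl_cons, if_pos hc]
      rw [this, ih out]
      simp [hc]
    · have hstep : foldCanon out (q :: rest) = foldCanon (out ++ [q]) rest := by
        simp only [foldCanon, List.foldl_cons, if_neg hc]
      rw [hstep, ih (out ++ [q])]
      rw [List.filter_cons, if_pos (by simp_all)]
      rw [show ∀ l, recCanon (q :: l) = q :: recCanon (l.filter (fun r => !decide (canonKey r = canonKey q))) from fun l => by rw [recCanon]]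
      have hfilter :
          rest.filter (fun b => !(out ++ [q]).any (fun r => decide (canonKey r = canonKey b)))
            = (rest.filter (fun b => !out.any (fun r => decide (canonKey r = canonKey b)))).filter
                (fun r => !decide (canonKey r = canonKey q)) := by
        rw [List.filter_filter]
        apply List.filter_congr
        intro b _
        simp only [List.any_append, List.any_cons, List.any_nil, Bool.or_false, Bool.not_or]
        rw [Bool.and_comm]
        congr 1
        simp [eq_comm]
      rw [hfilter]
      simp

-- A's fold-dedup equals canon fold-dedup when every dict in sight has nodup keys
lemma foldA_eq_foldCanon (qs : List (PySem.Dict String String)) (out : List (PySem.Dict String String))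
    (hq : ∀ q ∈ qs, q.keys.Nodup) (hout : ∀ r ∈ out, r.keys.Nodup) :
    qs.foldl dedupA out = foldCanon out qs := by
  induction qs generalizing out with
  | nil => rfl
  | cons q rest ih =>
    have hqk := hq q (by simp)
    have hcond : out.any (fun r => pyDictEq r q) = out.any (fun r => decide (canonKey r = canonKey q)) := by
      rw [Bool.eq_iff_iff]
      simp only [List.any_eq_true]
      constructor <;> rintro ⟨r, hr, hx⟩ <;> refine ⟨r, hr, ?_⟩ <;>
        rw [pyDictEq_eq_canon r q (hout r hr) hqk] at * <;> assumption
    rw [List.foldl_cons]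
    by_cases hc : out.any (fun r => decide (canonKey r = canonKey q)) = true
    · have h1 : dedupA out q = out := by unfold dedupA; rw [hcond]; exact if_pos hc
      have h2 : foldCanon out (q :: rest) = foldCanon out rest := by
        simp only [foldCanon, List.foldl_cons, if_pos hc]
      rw [h1, h2]
      exact ih out (fun x hx => hq x (by simp [hx])) hout
    · have h1 : dedupA out q = out ++ [q] := by unfold dedupA; rw [hcond]; exact if_neg hc
      have h2 : foldCanon out (q :: rest) = foldCanon (out ++ [q]) rest := by
        simp only [foldCanon, List.foldl_cons, if_neg hc]
      rw [h1, h2]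
      exact ih (out ++ [q]) (fun x hx => hq x (by simp [hx]))
        (by intro r hr
            rcases List.mem_append.mp hr with h | h
            · exact hout r h
            · simp at h; subst h; exact hqk)

-- B's recursive dedup equals the canon recursion when every dict has nodup keys
lemma bDedup_eq_recCanon : ∀ (qs : List (PySem.Dict String String)),
    (∀ q ∈ qs, q.keys.Nodup) → bDedup qs = recCanon qs
  | [], _ => by rw [show bDedup [] = [] from by rw [bDedup], show recCanon [] = [] from by rw [recCanon]]
  | head :: rest, hq => by
    have hhk := hq head (by simp)
    have hfilter : rest.filter (fun q => !pyDictEq q head)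
        = rest.filter (fun r => !decide (canonKey r = canonKey head)) := by
      apply List.filter_congr
      intro b hb
      rw [pyDictEq_eq_canon b head (hq b (by simp [hb])) hhk]
    rw [bDedup, recCanon, hfilter,
        bDedup_eq_recCanon _ (fun q hqm => hq q (by simp [(List.mem_filter.mp hqm).1]))]
termination_by qs => qs.length
decreasing_by simpa using (List.length_filter_le _ _).trans (by simp)

-- ===== VERDICT (by name: the statement is the Claim_ definition above) =====
theorem and_operator_query_py_spec : Claim_equal_and_operator_query_py := by
  intro prev cur expr _ hpre
  unfold Spec_and_operator_query_py
  unfold and_operator_query_py and_operator_query_py_alt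
  rw [aOuter_eq prev cur hpre [], bCross_eq prev cur hpre]
  have hcand : ∀ q ∈ prev.flatMap (fun p => cur.map (bMerge p)), q.keys.Nodup := by
    intro q hqmem
    simp only [List.mem_flatMap, List.mem_map] at hqmem
    obtain ⟨p, _, c, _, rfl⟩ := hqmem
    exact nodup_keys_bMerge p c
  dsimp only
  simp only [Option.getD_some]
  rw [show prev.foldl (fun m p => cur.foldl (fun m c => dedupA m (bMerge p c)) m) []
        = (prev.flatMap (fun p => cur.map (bMerge p))).foldl dedupA [] from by
      rw [List.foldl_flatMap]; simp only [List.foldl_map]]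
  rw [foldA_eq_foldCanon _ [] hcand (by simp), foldCanon_eq_recCanon,
      bDedup_eq_recCanon _ hcand]
  simp
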